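-- pv_equiv track=rewrite | github.com/AdeptLearner123/code_names_bot | code_names_bot/util/propose_rank.py | select_clue
-- ===== SOURCE A (Python) =====
-- def _get_guessable_words(words_ranked, pos_words):
--     for i, word in enumerate(words_ranked):
--         if word not in pos_words:
--             return words_ranked[:i]
--     return words_ranked
--
-- def select_clue(proposal_ranked_words, pos_words):
--     proposal_guessable_words = {
--         proposal: _get_guessable_words(ranked_words, pos_words)
--         for proposal, ranked_words in proposal_ranked_words.items()
--     }
--
--     proposal_score = {
--         proposal: len(guessable_words)
--         for proposal, guessable_words in proposal_guessable_words.items()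
--     }
--
--     clue = max(proposal_score, key=proposal_score.get)
--     return clue, proposal_guessable_words[clue]
-- ===== SOURCE B (Python) =====
-- def select_clue(proposal_ranked_words, pos_words):
--     best_clue = None
--     best_words = None
--     best_len = -1
--     for proposal, ranked_words in proposal_ranked_words.items():
--         prefix = []
--         for word in ranked_words:
--             if word not in pos_words:
--                 break
--             prefix.append(word)
--         if best_len < len(prefix):
--             best_clue, best_words, best_len = proposal, prefix, len(prefix)
--     if best_clue is None:
--         raise ValueError("select_clue: empty proposal_ranked_words")
--     return best_clue, best_words
-- ===== Notes on version B (the rewrite author's own statement) =====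
-- stated objective: simpler
-- what changed: Replaces the two intermediate dict comprehensions plus a key-based max() pass by one fused pass that keeps running best-clue/best-prefix/best-length variables, updating on strictly greater length so the first maximum wins as with max().
import Mathlib
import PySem

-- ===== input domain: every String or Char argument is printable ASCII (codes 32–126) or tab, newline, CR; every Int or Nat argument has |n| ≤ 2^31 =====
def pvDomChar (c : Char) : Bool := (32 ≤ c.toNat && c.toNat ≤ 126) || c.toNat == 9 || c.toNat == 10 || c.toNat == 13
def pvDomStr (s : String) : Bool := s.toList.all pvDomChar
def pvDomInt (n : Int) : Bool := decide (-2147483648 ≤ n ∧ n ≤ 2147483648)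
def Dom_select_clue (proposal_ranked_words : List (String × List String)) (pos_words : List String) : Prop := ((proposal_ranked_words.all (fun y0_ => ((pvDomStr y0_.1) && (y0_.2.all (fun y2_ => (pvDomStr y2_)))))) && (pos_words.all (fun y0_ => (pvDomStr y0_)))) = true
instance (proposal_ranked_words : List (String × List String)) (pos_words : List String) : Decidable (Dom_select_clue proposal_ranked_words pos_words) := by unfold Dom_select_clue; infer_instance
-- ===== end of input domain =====

-- B fuses A's two dict comprehensions and the max() pass into one loop with running best variables; objective: simpler (same asymptotic cost).

-- ===== PORT A =====
-- 'for i, word in enumerate(words_ranked): if word not in pos_words: return words_ranked[:i]; … return words_ranked'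
def getGuessableGo (words_ranked pos_words : List String) (i : Nat) : List String → List String
  | [] => words_ranked
  | w :: ws =>
      if w ∈ pos_words then getGuessableGo words_ranked pos_words (i + 1) ws
      else PySem.List.slice words_ranked none (some (i : Int))

def getGuessable (words_ranked pos_words : List String) : List String :=
  getGuessableGo words_ranked pos_words 0 words_ranked

def select_clue (proposal_ranked_words : List (String × List String)) (pos_words : List String) : String × List String :=
  let proposal_guessable_words : PySem.Dict String (List String) :=
    proposal_ranked_words.foldl (fun d item => d.insert item.1 (getGuessable item.2 pos_words)) PySem.Dict.empty
  let proposal_score : PySem.Dict String Int :=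
    proposal_guessable_words.items.foldl (fun d item => d.insert item.1 (item.2.length : Int)) PySem.Dict.empty
  -- max(proposal_score, key=proposal_score.get): every queried key is a key of the dict, so getD _ 0 is exact
  match PySem.List.max? proposal_score.keys (fun p => proposal_score.getD p 0) with
  | some clue => (clue, proposal_guessable_words.getD clue [])
  | none => ("", [])   -- Python raises ValueError here (empty dict); excluded by Pre_

-- ===== PORT B =====
-- Source B's inner loop: append words while they stay in pos_words, break at the first that does not
def prefixIn (pos_words : List String) : List String → List String
  | [] => []
  | w :: ws => if w ∈ pos_words then w :: prefixIn pos_words ws else []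

def select_clue_alt (proposal_ranked_words : List (String × List String)) (pos_words : List String) : String × List String :=
  let r := proposal_ranked_words.foldl
    (fun (st : Option (String × List String) × Int) item =>
      let pfx := prefixIn pos_words item.2
      if st.2 < (pfx.length : Int) then (some (item.1, pfx), (pfx.length : Int)) else st)
    (none, -1)
  match r.1 with
  | some best => best
  | none => ("", [])   -- Source B raises ValueError here (empty dict); excluded by Pre_

-- ===== PRECONDITION & SPEC =====
-- Pre_ excludes the empty dict, on which both programs raise ValueError, and association lists with
-- duplicate keys, which do not encode any Python dict (a Python dict collapses duplicates before either
-- function can see them).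
def Pre_select_clue (proposal_ranked_words : List (String × List String)) (pos_words : List String) : Prop :=
  proposal_ranked_words ≠ [] ∧ (proposal_ranked_words.map Prod.fst).Nodup
instance (proposal_ranked_words : List (String × List String)) (pos_words : List String) : Decidable (Pre_select_clue proposal_ranked_words pos_words) := by unfold Pre_select_clue; infer_instance

def pvWitness_select_clue : (List (String × List String)) × List String :=
  ([("cat", ["dog", "fish"]), ("pet", ["dog", "car"])], ["dog", "fish"])

def Spec_select_clue (proposal_ranked_words : List (String × List String)) (pos_words : List String) (out : String × List String) : Prop := out = select_clue_alt proposal_ranked_words pos_words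
instance (proposal_ranked_words : List (String × List String)) (pos_words : List String) (out : String × List String) : Decidable (Spec_select_clue proposal_ranked_words pos_words out) := by unfold Spec_select_clue; infer_instance

-- ===== CLAIM (what is proved, stated in full; the proofs are below) =====
def Claim_equal_select_clue : Prop := ∀ (proposal_ranked_words : List (String × List String)) (pos_words : List String), Dom_select_clue proposal_ranked_words pos_words → Pre_select_clue proposal_ranked_words pos_words → Spec_select_clue proposal_ranked_words pos_words (select_clue proposal_ranked_words pos_words)

-- ===== LEMMAS AND PROOFS =====

-- A's _get_guessable_words computes the longest prefix of members of pos_words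
lemma getGuessableGo_spec (pos_words : List String) :
    ∀ (suf pre : List String),
      getGuessableGo (pre ++ suf) pos_words pre.length suf = pre ++ prefixIn pos_words suf := by
  intro suf
  induction suf with
  | nil => intro pre; simp [getGuessableGo, prefixIn]
  | cons w ws ih =>
      intro pre
      by_cases hw : w ∈ pos_words
      · have step : getGuessableGo (pre ++ w :: ws) pos_words pre.length (w :: ws)
            = getGuessableGo ((pre ++ [w]) ++ ws) pos_words (pre ++ [w]).length ws := by
          simp only [getGuessableGo, if_pos hw]
          congr 1 <;> simp
        rw [step, ih (pre ++ [w])]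
        simp [prefixIn, hw]
      · simp [getGuessableGo, hw, prefixIn, PySem.List.slice_to_natCast]

lemma getGuessable_eq (words_ranked pos_words : List String) :
    getGuessable words_ranked pos_words = prefixIn pos_words words_ranked := by
  simpa using getGuessableGo_spec pos_words words_ranked []

-- the running-argmax invariant tying max?'s fold over keys to B's fused fold
lemma argmax_inv (val : String → Int) (look : String → List String) :
    ∀ (L : List (String × List String)),
      (∀ g ∈ L, val g.1 = (g.2.length : Int) ∧ look g.1 = g.2) →
      ∀ (m : String × List String), val m.1 = (m.2.length : Int) → look m.1 = m.2 →
      ∃ c : String × List String,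
        PySem.List.max? (m.1 :: L.map Prod.fst) val = some c.1
        ∧ L.foldl
            (fun (st : Option (String × List String) × Int) g =>
              if st.2 < (g.2.length : Int) then (some g, (g.2.length : Int)) else st)
            (some m, (m.2.length : Int)) = (some c, (c.2.length : Int))
        ∧ val c.1 = (c.2.length : Int) ∧ look c.1 = c.2 := by
  intro L
  induction L with
  | nil =>
      intro _ m hm1 hm2
      exact ⟨m, by simp [PySem.List.max?], rfl, hm1, hm2⟩
  | cons g L ih =>
      intro h m hm1 hm2
      obtain ⟨hg1, hg2⟩ := h g (by simp)
      have hL : ∀ g' ∈ L, val g'.1 = (g'.2.length : Int) ∧ look g'.1 = g'.2 :=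
        fun g' hg' => h g' (by simp [hg'])
      by_cases hlt : (m.2.length : Int) < (g.2.length : Int)
      · have hstep : PySem.List.max? (m.1 :: (g :: L).map Prod.fst) val
            = PySem.List.max? (g.1 :: L.map Prod.fst) val := by
          have hlt' : val m.1 < val g.1 := by rw [hm1, hg1]; exact hlt
          simp only [List.map_cons, PySem.List.max?, List.foldl_cons]
          norm_num [hlt']
        obtain ⟨c, hA, hB, hc1, hc2⟩ := ih hL g hg1 hg2
        refine ⟨c, ?_, ?_, hc1, hc2⟩
        · rw [hstep]; exact hA
        · simpa [hlt] using hB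
      · have hstep : PySem.List.max? (m.1 :: (g :: L).map Prod.fst) val
            = PySem.List.max? (m.1 :: L.map Prod.fst) val := by
          have hlt' : ¬ val m.1 < val g.1 := by rw [hm1, hg1]; exact hlt
          simp only [List.map_cons, PySem.List.max?, List.foldl_cons]
          norm_num [hlt']
        obtain ⟨c, hA, hB, hc1, hc2⟩ := ih hL m hm1 hm2
        refine ⟨c, ?_, ?_, hc1, hc2⟩
        · rw [hstep]; exact hA
        · simpa [hlt] using hB

-- ===== VERDICT (by name: the statement is the Claim_ definition above) =====
theorem select_clue_spec : Claim_equal_select_clue := by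
  intro pr pos _dom hpre
  obtain ⟨hne, hnd⟩ := hpre
  unfold Spec_select_clue
  set pgw : PySem.Dict String (List String) :=
    pr.foldl (fun d item => d.insert item.1 (getGuessable item.2 pos)) PySem.Dict.empty with hpgw_def
  set pscore : PySem.Dict String Int :=
    pgw.items.foldl (fun d item => d.insert item.1 (item.2.length : Int)) PySem.Dict.empty with hpscore_def
  have hfresh1 : ∀ a ∈ pr, (PySem.Dict.empty : PySem.Dict String (List String)).contains a.1 = false := by
    intro a _; simp [PySem.Dict.contains_empty]
  have hitems1 : pgw.items = pr.map (fun a => (a.1, prefixIn pos a.2)) := by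
    rw [hpgw_def, PySem.Dict.items_foldl_insert_fresh pr (fun a => a.1)
          (fun a => getGuessable a.2 pos) PySem.Dict.empty hfresh1 hnd]
    simp [getGuessable_eq, PySem.Dict.empty]
  have hkeys1 : pgw.keys = pr.map Prod.fst := by
    simp only [PySem.Dict.keys, hitems1, List.map_map]; rfl
  have hnd1 : pgw.keys.Nodup := by rw [hkeys1]; exact hnd
  have hfresh2 : ∀ a ∈ pgw.items, (PySem.Dict.empty : PySem.Dict String Int).contains a.1 = false := by
    intro a _; simp [PySem.Dict.contains_empty]
  have hnd2' : (pgw.items.map Prod.fst).Nodup := hnd1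
  have hitems2 : pscore.items = pr.map (fun a => (a.1, ((prefixIn pos a.2).length : Int))) := by
    rw [hpscore_def, PySem.Dict.items_foldl_insert_fresh pgw.items (fun a => a.1)
          (fun a => (a.2.length : Int)) PySem.Dict.empty hfresh2 hnd2']
    simp [hitems1, List.map_map, PySem.Dict.empty]
  have hkeys2 : pscore.keys = pr.map Prod.fst := by
    simp only [PySem.Dict.keys, hitems2, List.map_map]; rfl
  have hnd2 : pscore.keys.Nodup := by rw [hkeys2]; exact hnd
  have hval : ∀ g ∈ pr.map (fun a => (a.1, prefixIn pos a.2)),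
      pscore.getD g.1 0 = (g.2.length : Int) := by
    intro g hg
    apply PySem.Dict.getD_of_mem_items _ ?_ hnd2
    rw [hitems2]
    obtain ⟨a, ha, rfl⟩ := List.mem_map.mp hg
    exact List.mem_map.mpr ⟨a, ha, rfl⟩
  have hlook : ∀ g ∈ pr.map (fun a => (a.1, prefixIn pos a.2)),
      pgw.getD g.1 [] = g.2 := by
    intro g hg
    apply PySem.Dict.getD_of_mem_items _ ?_ hnd1
    rw [hitems1]; exact hg
  obtain ⟨p, rest, rfl⟩ : ∃ p rest, pr = p :: rest := by
    cases pr with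
    | nil => exact absurd rfl hne
    | cons p rest => exact ⟨p, rest, rfl⟩
  have hBfold : ∀ (init : Option (String × List String) × Int),
      rest.foldl (fun (st : Option (String × List String) × Int) item =>
          let pfx := prefixIn pos item.2
          if st.2 < (pfx.length : Int) then (some (item.1, pfx), (pfx.length : Int)) else st) init
      = (rest.map (fun a => (a.1, prefixIn pos a.2))).foldl
          (fun (st : Option (String × List String) × Int) g =>
            if st.2 < (g.2.length : Int) then (some g, (g.2.length : Int)) else st) init := by
    intro init; rw [List.foldl_map]
  have hmem0 : (p.1, prefixIn pos p.2) ∈ (p :: rest).map (fun a => (a.1, prefixIn pos a.2)) := by simp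
  obtain ⟨c, hA, hB, hc1, hc2⟩ :=
    argmax_inv (fun k => pscore.getD k 0) (fun k => pgw.getD k [])
      (rest.map (fun a => (a.1, prefixIn pos a.2)))
      (fun g hg => ⟨hval g (by simp [hg]), hlook g (by simp [hg])⟩)
      (p.1, prefixIn pos p.2) (hval _ hmem0) (hlook _ hmem0)
  dsimp only at hA hB
  show (match PySem.List.max? pscore.keys (fun q => pscore.getD q 0) with
        | some clue => (clue, pgw.getD clue [])
        | none => ("", ([] : List String)))
      = (match ((p :: rest).foldl (fun (st : Option (String × List String) × Int) item =>
            let pfx := prefixIn pos item.2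
            if st.2 < (pfx.length : Int) then (some (item.1, pfx), (pfx.length : Int)) else st)
            ((none : Option (String × List String)), (-1 : Int))).1 with
        | some best => best
        | none => ("", []))
  -- B side: first iteration installs the first proposal, then hB finishes the fold
  have hstart : (p :: rest).foldl (fun (st : Option (String × List String) × Int) item =>
        let pfx := prefixIn pos item.2
        if st.2 < (pfx.length : Int) then (some (item.1, pfx), (pfx.length : Int)) else st)
        ((none : Option (String × List String)), (-1 : Int))
      = rest.foldl (fun (st : Option (String × List String) × Int) item =>
        let pfx := prefixIn pos item.2
        if st.2 < (pfx.length : Int) then (some (item.1, pfx), (pfx.length : Int)) else st)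
        (some (p.1, prefixIn pos p.2), ((prefixIn pos p.2).length : Int)) := by
    rw [List.foldl_cons]; congr 1
  rw [hstart, hBfold, hB]
  -- A side: unfold max? and consume the first key, then hA finishes the fold
  have hk : List.map Prod.fst (List.map (fun a => (a.1, prefixIn pos a.2)) rest)
      = List.map Prod.fst rest := by
    simp [List.map_map]
  rw [hkeys2]
  simp only [List.map_cons, ← hk]
  rw [hA]
  exact Prod.ext rfl hc2
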